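-- pv_equiv track=rewrite | github.com/cashenchris/grouptheory | group.py | freereduce
-- ===== SOURCE A (Python) =====
-- def freereduce(l):
--     """
--     Free reduces a list of integers.
--     """
--     if len(l)<2:
--         return l
--     else:
--         reduction=[l[0]]
--         for i in range(len(l)-1):
--             if reduction==[]:
--                 reduction=[l[i+1]]
--             else:
--                 if reduction[-1]==-l[i+1]:
--                     reduction.pop()
--                 else:
--                     reduction.append(l[i+1])
--     return reduction
-- ===== SOURCE B (Python) =====
-- def _del_first_pair(w):
--     for i in range(len(w) - 1):
--         if w[i] == -w[i+1]:
--             return w[:i] + w[i+2:]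
--     return None
--
-- def freereduce(l):
--     """
--     Free reduces a list of integers.
--     """
--     if len(l) < 2:
--         return l
--     w = l
--     while True:
--         nxt = _del_first_pair(w)
--         if nxt is None:
--             return w
--         w = nxt
-- ===== Notes on version B (the rewrite author's own statement) =====
-- stated objective: alternative
-- what changed: Replaces the single left-to-right stack pass with a repeated-scan fixpoint that deletes the first adjacent inverse pair and rescans until none remains; equal by uniqueness of the free reduction.
import Mathlib
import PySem

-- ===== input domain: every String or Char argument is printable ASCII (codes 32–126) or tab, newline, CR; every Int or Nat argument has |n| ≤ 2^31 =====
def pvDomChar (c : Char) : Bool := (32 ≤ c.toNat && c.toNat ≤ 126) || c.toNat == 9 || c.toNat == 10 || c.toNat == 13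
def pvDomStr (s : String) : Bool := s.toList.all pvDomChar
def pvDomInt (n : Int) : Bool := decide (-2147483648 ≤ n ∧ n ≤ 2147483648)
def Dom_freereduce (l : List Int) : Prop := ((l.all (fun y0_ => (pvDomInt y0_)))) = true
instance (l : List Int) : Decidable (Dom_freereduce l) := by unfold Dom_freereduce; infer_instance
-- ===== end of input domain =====

-- B replaces A's single stack pass by a repeated-scan fixpoint deleting the first adjacent
-- inverse pair until none remains (alternative algorithm, same result by uniqueness of free reduction).


-- ===== PORT A =====
-- A's loop body: stack kept in list order, push at the end, pop the last element.
def astep (reduction : List Int) (x : Int) : List Int :=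
  if reduction = [] then [x]
  else if reduction.getLast?.getD 0 = -x then reduction.dropLast
  else reduction ++ [x]

def freereduce (l : List Int) : List Int :=
  if l.length < 2 then l
  else (List.drop 1 l).foldl astep [(l.head?).getD 0]

-- ===== PORT B =====
-- port of _del_first_pair: scan for the first i with w[i] = -w[i+1]; delete both, else None
def delFirst : List Int → Option (List Int)
  | x :: y :: t => if x = -y then some t else (delFirst (y :: t)).map (x :: ·)
  | _ => none

theorem delFirst_length : ∀ (l l' : List Int), delFirst l = some l' → l'.length + 2 = l.length := by
  intro l
  induction l with
  | nil => intro l' h; simp [delFirst] at h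
  | cons x t ih =>
    intro l' h
    cases t with
    | nil => simp [delFirst] at h
    | cons y t' =>
      simp only [delFirst] at h
      split at h
      · cases h; simp
      · rcases Option.map_eq_some_iff.mp h with ⟨m, hm, rfl⟩
        have := ih m hm
        simp only [List.length_cons] at this ⊢
        omega

-- port of B's while-loop: repeat first-pair deletion until none remains
def scanReduce (l : List Int) : List Int :=
  match h : delFirst l with
  | some l' =>
    have : l'.length < l.length := by have := delFirst_length l l' h; omega
    scanReduce l'
  | none => l
termination_by l.length

def freereduce_alt (l : List Int) : List Int :=
  if l.length < 2 then l else scanReduce l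

-- ===== PRECONDITION & SPEC =====
def Spec_freereduce (l : List Int) (out : List Int) : Prop := out = freereduce_alt l
instance (l : List Int) (out : List Int) : Decidable (Spec_freereduce l out) := by unfold Spec_freereduce; infer_instance

-- ===== CLAIM (what is proved, stated in full; the proofs are below) =====
def Claim_equal_freereduce : Prop := ∀ (l : List Int), Dom_freereduce l → Spec_freereduce l (freereduce l)

-- ===== LEMMAS AND PROOFS =====

-- the same stack kept in reversed order (head = top); reference reduction function
def rstep (s : List Int) (x : Int) : List Int :=
  match s with
  | [] => [x]
  | h :: t => if h = -x then t else x :: h :: t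

def Rfun (l : List Int) : List Int := (l.foldl rstep []).reverse

theorem astep_bridge (r : List Int) (x : Int) : astep r x = (rstep r.reverse x).reverse := by
  induction r using List.reverseRecOn with
  | nil => simp [astep, rstep]
  | append_singleton r' a _ =>
    simp only [astep, List.reverse_append, List.reverse_singleton, List.singleton_append, rstep]
    by_cases h : a = -x
    · simp [h]
    · have hne : (r' ++ [a]) ≠ [] := by simp
      simp [hne, h]

theorem foldl_bridge (l : List Int) : ∀ (r : List Int),
    l.foldl astep r = (l.foldl rstep r.reverse).reverse := by
  induction l with
  | nil => intro r; simp
  | cons x t ih =>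
    intro r
    simp only [List.foldl_cons]
    rw [ih (astep r x), astep_bridge, List.reverse_reverse]

-- a stack is irreducible: no adjacent inverse pair
def Irr : List Int → Prop
  | a :: b :: t => a ≠ -b ∧ Irr (b :: t)
  | _ => True

theorem irr_tail (a : Int) (t : List Int) (h : Irr (a :: t)) : Irr t := by
  cases t with
  | nil => trivial
  | cons b t' => exact h.2

theorem irr_rstep (s : List Int) (x : Int) (h : Irr s) : Irr (rstep s x) := by
  cases s with
  | nil => exact trivial
  | cons a t =>
    simp only [rstep]
    by_cases hax : a = -x
    · simp only [hax]
      exact irr_tail a t (hax ▸ h)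
    · simp only [hax, if_false]
      exact ⟨fun hc => hax (by omega), h⟩

theorem rstep_cancel (s : List Int) (x : Int) (h : Irr s) : rstep (rstep s x) (-x) = s := by
  cases s with
  | nil => simp [rstep]
  | cons a t =>
    by_cases hax : a = -x
    · simp only [rstep, hax]
      cases t with
      | nil => simp [rstep]
      | cons b t' =>
        have hab : a ≠ -b := h.1
        have hbx : b ≠ x := fun hb => hab (by omega)
        simp [hbx]
    · simp [rstep, hax]

theorem delFirst_some_fold : ∀ (l l' : List Int), delFirst l = some l' →
    ∀ (s : List Int), Irr s → l.foldl rstep s = l'.foldl rstep s := by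
  intro l
  induction l with
  | nil => intro l' h; simp [delFirst] at h
  | cons x t ih =>
    intro l' h s hs
    cases t with
    | nil => simp [delFirst] at h
    | cons y t' =>
      simp only [delFirst] at h
      split at h
      · rename_i hxy
        cases h
        have hy : y = -x := by omega
        simp only [List.foldl_cons]
        rw [hy, rstep_cancel s x hs]
      · rcases Option.map_eq_some_iff.mp h with ⟨m, hm, rfl⟩
        simp only [List.foldl_cons]
        exact ih m hm (rstep s x) (irr_rstep s x hs)

theorem delFirst_none_fold : ∀ (l s : List Int), delFirst l = none → Irr s →
    (∀ h a, s.head? = some h → l.head? = some a → h ≠ -a) →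
    l.foldl rstep s = l.reverse ++ s := by
  intro l
  induction l with
  | nil => intro s _ _ _; simp
  | cons x t ih =>
    intro s hd hs hcompat
    have hpush : rstep s x = x :: s := by
      cases s with
      | nil => simp [rstep]
      | cons h t' =>
        have : h ≠ -x := hcompat h x rfl rfl
        simp [rstep, this]
    cases t with
    | nil => simp [hpush]
    | cons y t' =>
      simp only [delFirst] at hd
      split at hd
      · exact absurd hd (by simp)
      · rename_i hxy
        have hd' : delFirst (y :: t') = none := by
          cases hdy : delFirst (y :: t') with
          | none => rfl
          | some m => rw [hdy] at hd; simp at hd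
        have hirr : Irr (x :: s) := by
          cases s with
          | nil => trivial
          | cons h t'' =>
            exact ⟨fun hc => (hcompat h x rfl rfl) (by omega), hs⟩
        have hrec := ih (x :: s) hd' hirr (by
          intro h a hh ha
          simp at hh ha
          subst hh; subst ha
          exact hxy)
        rw [List.foldl_cons, hpush, hrec]
        simp
      
theorem scan_eq_Rfun (l : List Int) : scanReduce l = Rfun l := by
  induction l using scanReduce.induct with
  | case1 l l' hdel hlt ih =>
    rw [scanReduce]
    split
    · rename_i m hm
      rw [hdel] at hm
      cases hm
      rw [ih]
      unfold Rfun
      rw [delFirst_some_fold l l' hdel [] trivial]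
    · rename_i hm
      rw [hdel] at hm
      exact absurd hm (by simp)
  | case2 l hdel =>
    rw [scanReduce]
    split
    · rename_i m hm
      rw [hdel] at hm
      exact absurd hm (by simp)
    · unfold Rfun
      rw [delFirst_none_fold l [] hdel trivial (by intro h a hh; simp at hh)]
      simp

theorem freereduce_eq_Rfun (l : List Int) : freereduce l = Rfun l := by
  unfold freereduce
  by_cases hlen : l.length < 2
  · rw [if_pos hlen]
    match l, hlen with
    | [], _ => simp [Rfun]
    | [a], _ => simp [Rfun, rstep]
  · rw [if_neg hlen]
    cases l with
    | nil => simp at hlen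
    | cons a t =>
      simp only [List.drop_one, List.tail_cons, List.head?_cons, Option.getD_some]
      rw [foldl_bridge]
      unfold Rfun
      simp [rstep]

theorem alt_eq_scan (l : List Int) : freereduce_alt l = scanReduce l := by
  unfold freereduce_alt
  by_cases hlen : l.length < 2
  · rw [if_pos hlen, scanReduce]
    have hd : delFirst l = none := by
      match l, hlen with
      | [], _ => rfl
      | [a], _ => rfl
    split
    · rename_i m hm
      rw [hd] at hm
      exact absurd hm (by simp)
    · rfl
  · rw [if_neg hlen]

-- ===== VERDICT (by name: the statement is the Claim_ definition above) =====
theorem freereduce_spec : Claim_equal_freereduce := by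
  intro l _
  unfold Spec_freereduce
  rw [freereduce_eq_Rfun, alt_eq_scan, scan_eq_Rfun]
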